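-- pv_equiv track=rewrite | github.com/VRAXION/VRAXION | v4/research/v22/tests/logic_composition_test.py | make_composition_dataset
-- ===== SOURCE A (Python) =====
-- def make_composition_dataset(N):
--     """Generate all (A, B, C) triples with A+B > C label."""
--     inputs_a, inputs_b, inputs_c, targets = [], [], [], []
--     max_sum = 2 * (N - 1)  # max possible A+B
--     for a in range(N):
--         for b in range(N):
--             for c in range(max_sum + 1):
--                 if c >= N:
--                     continue  # keep C in same range for encoding
--                 inputs_a.append(a)
--                 inputs_b.append(b)
--                 inputs_c.append(c)
--                 targets.append(1 if (a + b) > c else 0)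
--     return inputs_a, inputs_b, inputs_c, targets
-- ===== SOURCE B (Python) =====
-- def make_composition_dataset(N):
--     """Generate all (A, B, C) triples with A+B > C label."""
--     n2 = N * N
--     ks = range(N * n2)
--     inputs_a = [k // n2 for k in ks]
--     inputs_b = [k // N % N for k in ks]
--     inputs_c = [k % N for k in ks]
--     targets = [1 if k // n2 + k // N % N > k % N else 0 for k in ks]
--     return inputs_a, inputs_b, inputs_c, targets
-- ===== Notes on version B (the rewrite author's own statement) =====
-- stated objective: alternative
-- what changed: The three nested loops (with the c>=N skip branch) are replaced by a single flat index space range(N**3): each of the four output lists is built in its own pass, decoding the flat index k into (a,b,c) = (k//N**2, k//N%N, k%N) by div/mod arithmetic.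
import Mathlib
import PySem

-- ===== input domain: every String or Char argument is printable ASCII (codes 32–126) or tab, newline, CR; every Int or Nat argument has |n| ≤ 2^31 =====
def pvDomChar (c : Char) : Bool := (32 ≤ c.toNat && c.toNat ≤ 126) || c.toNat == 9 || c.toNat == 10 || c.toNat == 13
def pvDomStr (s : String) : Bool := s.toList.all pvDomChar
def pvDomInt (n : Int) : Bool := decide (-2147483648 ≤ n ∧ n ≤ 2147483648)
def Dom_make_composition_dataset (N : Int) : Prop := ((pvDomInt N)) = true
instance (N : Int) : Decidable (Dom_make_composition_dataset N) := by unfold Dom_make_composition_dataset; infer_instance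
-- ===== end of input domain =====

-- B flattens the triple loop into one index space range(N^3) decoded by div/mod, built in four staged passes (alternative decomposition).


-- ===== PORT A =====
def make_composition_dataset (N : Int) : List Int × List Int × List Int × List Int :=
  (PySem.List.pyRange 0 N 1).foldl (fun st a =>
    (PySem.List.pyRange 0 N 1).foldl (fun st b =>
      (PySem.List.pyRange 0 (2 * (N - 1) + 1) 1).foldl (fun st c =>
        if c ≥ N then st
        else (st.1 ++ [a], st.2.1 ++ [b], st.2.2.1 ++ [c],
              st.2.2.2 ++ [if a + b > c then (1 : Int) else 0])) st) st)
    ([], [], [], [])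

-- ===== PORT B =====
def make_composition_dataset_alt (N : Int) : List Int × List Int × List Int × List Int :=
  let n2 := N * N
  let ks := PySem.List.pyRange 0 (N * n2) 1
  (ks.map (fun k => PySem.Int.floordiv k n2),
   ks.map (fun k => PySem.Int.mod (PySem.Int.floordiv k N) N),
   ks.map (fun k => PySem.Int.mod k N),
   ks.map (fun k => if PySem.Int.floordiv k n2 + PySem.Int.mod (PySem.Int.floordiv k N) N > PySem.Int.mod k N
                    then (1 : Int) else 0))

-- ===== PRECONDITION & SPEC =====
def Spec_make_composition_dataset (N : Int) (out : List Int × List Int × List Int × List Int) : Prop := out = make_composition_dataset_alt N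
instance (N : Int) (out : List Int × List Int × List Int × List Int) : Decidable (Spec_make_composition_dataset N out) := by unfold Spec_make_composition_dataset; infer_instance

-- ===== CLAIM (what is proved, stated in full; the proofs are below) =====
def Claim_equal_make_composition_dataset : Prop := ∀ (N : Int), Dom_make_composition_dataset N → Spec_make_composition_dataset N (make_composition_dataset N)

-- ===== LEMMAS AND PROOFS =====

-- a fold whose step skips every element of l is the identity
theorem pv_foldl_skip {α β : Type} (l : List β) (p : β → Prop) [DecidablePred p]
    (f : α → β → α) (st : α) (h : ∀ x ∈ l, p x) :
    l.foldl (fun st x => if p x then st else f st x) st = st := by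
  induction l generalizing st with
  | nil => rfl
  | cons y ys ih =>
      simp only [List.foldl_cons, if_pos (h y List.mem_cons_self)]
      exact ih st (fun x hx => h x (List.mem_cons_of_mem _ hx))

-- a fold that appends a block to each of four lists equals four flatMap-appends
theorem pv_foldl_flat4 {β : Type} (l : List β) (F G H K : β → List Int)
    (st : List Int × List Int × List Int × List Int) :
    l.foldl (fun st x => (st.1 ++ F x, st.2.1 ++ G x, st.2.2.1 ++ H x, st.2.2.2 ++ K x)) st
    = (st.1 ++ l.flatMap F, st.2.1 ++ l.flatMap G, st.2.2.1 ++ l.flatMap H, st.2.2.2 ++ l.flatMap K) := by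
  induction l generalizing st with
  | nil => simp
  | cons y ys ih => simp [ih]

-- A's inner c-loop equals four map-appends over range(N) (for any a b, once a ∈ range(N) forces N ≥ 1)
theorem pv_inner (N a b : Int) (hN : 0 < N)
    (st : List Int × List Int × List Int × List Int) :
    (PySem.List.pyRange 0 (2 * (N - 1) + 1) 1).foldl (fun st c =>
        if c ≥ N then st
        else (st.1 ++ [a], st.2.1 ++ [b], st.2.2.1 ++ [c],
              st.2.2.2 ++ [if a + b > c then (1 : Int) else 0])) st
    = (st.1 ++ (PySem.List.pyRange 0 N 1).map (fun _ => a),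
       st.2.1 ++ (PySem.List.pyRange 0 N 1).map (fun _ => b),
       st.2.2.1 ++ (PySem.List.pyRange 0 N 1).map (fun c => c),
       st.2.2.2 ++ (PySem.List.pyRange 0 N 1).map (fun c => if a + b > c then (1 : Int) else 0)) := by
  rw [PySem.List.pyRange_one_append 0 N (2 * (N - 1) + 1) (le_of_lt hN) (by omega),
      List.foldl_append]
  rw [pv_foldl_skip _ (fun c => c ≥ N) _ _ (by
      intro x hx
      rw [PySem.List.mem_pyRange_one] at hx
      exact hx.1)]
  rw [PySem.List.foldl_congr_mem' (g := fun st c =>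
        (st.1 ++ [a], st.2.1 ++ [b], st.2.2.1 ++ [c],
         st.2.2.2 ++ [if a + b > c then (1 : Int) else 0]))
      (h := by
        intro c hc st'
        rw [PySem.List.mem_pyRange_one] at hc
        rw [if_neg (by omega)])]
  rw [pv_foldl_flat4 _ (fun c => [a]) (fun c => [b]) (fun c => [c])
        (fun c => [if a + b > c then (1 : Int) else 0])]
  simp only [← List.map_eq_flatMap]

-- range(0, n*m) splits into n blocks of m (Int version of the flat-index decomposition)
theorem pv_range_split (n m : Int) (hn : 0 ≤ n) (hm : 0 ≤ m) :
    PySem.List.pyRange 0 (n * m) 1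
    = (PySem.List.pyRange 0 n 1).flatMap (fun i =>
        (PySem.List.pyRange 0 m 1).map (fun j => i * m + j)) := by
  have key : ∀ (n' m' : Nat), List.range (n' * m')
      = (List.range n').flatMap (fun i => (List.range m').map (fun j => i * m' + j)) := by
    intro n' m'
    induction n' with
    | zero => simp
    | succ k ih =>
        rw [Nat.succ_mul, List.range_add, List.range_succ, ih]
        simp [List.flatMap_append, Nat.mul_comm]
  simp only [PySem.List.pyRange_one, zero_add, Int.sub_zero, List.flatMap_map]
  rw [Int.toNat_mul hn hm, key, List.map_flatMap]
  apply List.flatMap_congr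
  intro i _
  simp only [List.map_map, Function.comp_def]
  apply List.map_congr_left
  intro j _
  push_cast [Int.toNat_of_nonneg hm]
  ring

-- (q*N + r) // N = q and (r + q*N) % N = r for 0 ≤ r < N
theorem pv_decode_div (q r N : Int) (hN : 0 < N) (hr0 : 0 ≤ r) (hrN : r < N) :
    PySem.Int.floordiv (r + q * N) N = q := by
  rw [PySem.Int.floordiv_eq_iff_of_pos hN]
  constructor <;> nlinarith

theorem pv_decode_mod (q r N : Int) (hN : 0 < N) (hr0 : 0 ≤ r) (hrN : r < N) :
    PySem.Int.mod (r + q * N) N = r := by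
  rw [PySem.Int.mod_eq_emod_of_pos hN, Int.add_mul_emod_self_right]
  exact Int.emod_eq_of_lt hr0 hrN

-- decoding the flat index a*(N*N) + (b*N + c) recovers a, b, c
theorem pv_decode (N a b c : Int) (hN : 0 < N) (_ha0 : 0 ≤ a) (_haN : a < N)
    (hb0 : 0 ≤ b) (hbN : b < N) (hc0 : 0 ≤ c) (hcN : c < N) :
    PySem.Int.floordiv (a * (N * N) + (b * N + c)) (N * N) = a
    ∧ PySem.Int.mod (PySem.Int.floordiv (a * (N * N) + (b * N + c)) N) N = b
    ∧ PySem.Int.mod (a * (N * N) + (b * N + c)) N = c := by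
  have e1 : a * (N * N) + (b * N + c) = c + (a * N + b) * N := by ring
  have e2 : a * (N * N) + (b * N + c) = (b * N + c) + a * (N * N) := by ring
  have hbn : 0 ≤ b * N := mul_nonneg hb0 (le_of_lt hN)
  refine ⟨?_, ?_, ?_⟩
  · rw [e2, pv_decode_div a (b * N + c) (N * N) (by positivity) (by omega) (by nlinarith)]
  · rw [e1, pv_decode_div (a * N + b) c N hN hc0 hcN,
        show a * N + b = b + a * N by ring, pv_decode_mod a b N hN hb0 hbN]
  · rw [e1, pv_decode_mod (a * N + b) c N hN hc0 hcN]

-- ===== VERDICT (by name: the statement is the Claim_ definition above) =====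
theorem make_composition_dataset_spec : Claim_equal_make_composition_dataset := by
  intro N _
  unfold Spec_make_composition_dataset make_composition_dataset make_composition_dataset_alt
  rcases lt_or_ge N 0 with hneg | hN
  · have h1 : PySem.List.pyRange 0 N 1 = [] := by
      simp [PySem.List.pyRange_one]
      omega
    have h2 : PySem.List.pyRange 0 (N * (N * N)) 1 = [] := by
      have hsq : 0 ≤ N * N := mul_self_nonneg N
      simp [PySem.List.pyRange_one]
      nlinarith
    simp [h1, h2]
  · -- rewrite A's nested folds into flatMaps of maps
    rw [PySem.List.foldl_congr_mem' (g := fun st a =>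
          (PySem.List.pyRange 0 N 1).foldl (fun st b =>
            (st.1 ++ (PySem.List.pyRange 0 N 1).map (fun _ => a),
             st.2.1 ++ (PySem.List.pyRange 0 N 1).map (fun _ => b),
             st.2.2.1 ++ (PySem.List.pyRange 0 N 1).map (fun c => c),
             st.2.2.2 ++ (PySem.List.pyRange 0 N 1).map (fun c => if a + b > c then (1 : Int) else 0))) st)
        (h := by
          intro a ha st
          apply PySem.List.foldl_congr_mem'
          intro b hb st'
          rw [PySem.List.mem_pyRange_one] at ha
          exact pv_inner N a b (by omega) st')]
    rw [PySem.List.foldl_congr_mem' (g := fun st a =>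
          (st.1 ++ (PySem.List.pyRange 0 N 1).flatMap (fun _ => (PySem.List.pyRange 0 N 1).map (fun _ => a)),
           st.2.1 ++ (PySem.List.pyRange 0 N 1).flatMap (fun b => (PySem.List.pyRange 0 N 1).map (fun _ => b)),
           st.2.2.1 ++ (PySem.List.pyRange 0 N 1).flatMap (fun _ => (PySem.List.pyRange 0 N 1).map (fun c => c)),
           st.2.2.2 ++ (PySem.List.pyRange 0 N 1).flatMap (fun b => (PySem.List.pyRange 0 N 1).map (fun c => if a + b > c then (1 : Int) else 0))))
        (h := by
          intro a _ st
          exact pv_foldl_flat4 _ _ _ _ _ st)]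
    rw [pv_foldl_flat4]
    -- rewrite B's flat index space into the same nested flatMaps
    simp only []
    rw [pv_range_split N (N * N) hN (by positivity),
        pv_range_split N N hN hN]
    simp only [List.map_flatMap, List.map_map, List.nil_append, Function.comp_def]
    refine Prod.ext ?_ (Prod.ext ?_ (Prod.ext ?_ ?_)) <;>
    · apply List.flatMap_congr
      intro a ha
      rw [PySem.List.mem_pyRange_one] at ha
      apply List.flatMap_congr
      intro b hb
      rw [PySem.List.mem_pyRange_one] at hb
      apply List.map_congr_left
      intro c hc
      rw [PySem.List.mem_pyRange_one] at hc
      obtain ⟨d1, d2, d3⟩ := pv_decode N a b c (by omega) ha.1 ha.2 hb.1 hb.2 hc.1 hc.2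
      simp only [d1, d2, d3]
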